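-- pv_equiv track=rewrite | github.com/aashutoshjha1/python-exercise | factorial.py | factorial1
-- ===== SOURCE A (Python) =====
-- def factorial1(n):
--     for i in range(1, n+1):
--         result = 1
--         if i == 1:
--             yield result
--         else:
--             while i > 0:
--                 result = result * i
--                 i = i -1
--             yield result
-- ===== SOURCE B (Python) =====
-- def factorial1(n):
--     acc = 1
--     for i in range(1, n + 1):
--         acc *= i
--         yield acc
-- ===== Notes on version B (the rewrite author's own statement) =====
-- stated objective: faster
-- what changed: B keeps a running product and multiplies by i each step instead of recomputing each factorial with an inner while-loop from scratch.
import Mathlib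
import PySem

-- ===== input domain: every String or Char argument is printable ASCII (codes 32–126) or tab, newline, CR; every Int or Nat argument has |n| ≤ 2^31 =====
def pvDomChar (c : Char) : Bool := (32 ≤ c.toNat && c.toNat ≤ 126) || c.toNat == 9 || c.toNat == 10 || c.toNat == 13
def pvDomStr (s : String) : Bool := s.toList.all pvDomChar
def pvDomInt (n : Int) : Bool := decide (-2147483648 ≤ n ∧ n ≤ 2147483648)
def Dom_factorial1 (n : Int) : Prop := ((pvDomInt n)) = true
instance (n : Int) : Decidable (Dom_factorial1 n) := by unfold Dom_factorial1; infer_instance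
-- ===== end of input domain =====

-- B replaces A's per-element inner while-loop (recomputing i! from scratch) with a single
-- running product, multiplying by i at each step (asymptotically faster).

-- ===== PORT A =====
-- the inner 'while i > 0: result = result * i; i = i - 1' of A, returning the final result
def factWhileA (i result : Int) : Int :=
  if 0 < i then factWhileA (i - 1) (result * i) else result
termination_by i.toNat
decreasing_by omega

def factorial1 (n : Int) : List Int :=
  (PySem.List.pyRange 1 (n + 1) 1).map (fun i => if i == 1 then (1 : Int) else factWhileA i 1)

-- ===== PORT B =====
def factorial1_alt (n : Int) : List Int :=
  ((PySem.List.pyRange 1 (n + 1) 1).foldl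
    (fun (s : Int × List Int) i => (s.1 * i, s.2 ++ [s.1 * i])) ((1 : Int), ([] : List Int))).2

-- ===== PRECONDITION & SPEC =====
def Spec_factorial1 (n : Int) (out : List Int) : Prop := out = factorial1_alt n
instance (n : Int) (out : List Int) : Decidable (Spec_factorial1 n out) := by unfold Spec_factorial1; infer_instance

-- ===== CLAIM (what is proved, stated in full; the proofs are below) =====
def Claim_equal_factorial1 : Prop := ∀ (n : Int), Dom_factorial1 n → Spec_factorial1 n (factorial1 n)

-- ===== LEMMAS AND PROOFS =====

theorem factWhileA_zero : factWhileA 0 1 = 1 := by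
  rw [factWhileA]; norm_num

theorem factWhileA_mul (k : Nat) : ∀ (i r : Int), i.toNat = k → factWhileA i r = r * factWhileA i 1 := by
  induction k with
  | zero =>
      intro i r hk
      conv_lhs => rw [factWhileA, if_neg (show ¬ (0:Int) < i by omega)]
      conv_rhs => rw [factWhileA, if_neg (show ¬ (0:Int) < i by omega)]
      ring
  | succ k ih =>
      intro i r hk
      conv_lhs => rw [factWhileA, if_pos (show (0:Int) < i by omega)]
      conv_rhs => rw [factWhileA, if_pos (show (0:Int) < i by omega)]
      rw [ih (i - 1) (r * i) (by omega), ih (i - 1) (1 * i) (by omega)]; ring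

theorem factWhileA_step (a : Int) (h : 0 < a) :
    factWhileA a 1 = a * factWhileA (a - 1) 1 := by
  rw [factWhileA, if_pos h, factWhileA_mul (a - 1).toNat (a - 1) (1 * a) rfl]; ring

theorem factWhileA_one : factWhileA 1 1 = 1 := by
  rw [factWhileA_step 1 (by norm_num)]; norm_num [factWhileA_zero]

theorem fold_inv (t : Nat) : ∀ (a b acc : Int) (pre : List Int), 0 < a → (b - a).toNat = t →
    acc = factWhileA (a - 1) 1 →
    ((PySem.List.pyRange a b 1).foldl
      (fun (s : Int × List Int) i => (s.1 * i, s.2 ++ [s.1 * i])) (acc, pre)).2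
    = pre ++ (PySem.List.pyRange a b 1).map (fun i => if i == 1 then (1 : Int) else factWhileA i 1) := by
  induction t with
  | zero =>
      intro a b acc pre ha ht hacc
      rw [PySem.List.pyRange_one_eq_nil (by omega)]
      simp only [List.foldl_nil, List.map_nil, List.append_nil]
  | succ t ih =>
      intro a b acc pre ha ht hacc
      rw [PySem.List.pyRange_one_cons (by omega)]
      simp only [List.foldl_cons, List.map_cons]
      have hstep : acc * a = factWhileA a 1 := by
        rw [hacc, factWhileA_step a ha]; ring
      have hhead : (if a == 1 then (1 : Int) else factWhileA a 1) = factWhileA a 1 := by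
        by_cases h1 : a = 1
        · subst h1; simp [factWhileA_one]
        · simp [h1]
      have hrec := ih (a + 1) b (acc * a) (pre ++ [acc * a]) (by omega) (by omega)
        (by rw [hstep]; norm_num)
      rw [hrec, hhead, hstep]
      simp only [List.append_assoc, List.singleton_append]

-- ===== VERDICT (by name: the statement is the Claim_ definition above) =====
theorem factorial1_spec : Claim_equal_factorial1 := by
  intro n _
  unfold Spec_factorial1 factorial1 factorial1_alt
  exact (fold_inv ((n + 1) - 1).toNat 1 (n + 1) 1 [] (by norm_num) rfl
    (by norm_num [factWhileA_zero])).symm
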